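-- pv_equiv track=rewrite | github.com/noahostle/SPEAR | stage_peel_attack.py | best_sampled_low_plateau_from_decoded
-- ===== SOURCE A (Python) =====
-- from typing import Iterable, List, Sequence, Tuple
--
-- def sampled_output_stage_score_from_decoded(
--     decoded_groups: Sequence[Sequence[Tuple[int, int]]],
--     state_low_guess: int,
-- ) -> int:
--     total = 0
--     for group in decoded_groups:
--         seen = set()
--         for decoded_high, decoded_low in group:
--             borrow = 1 if decoded_low < state_low_guess else 0
--             seen.add((decoded_high - borrow) & 0xFF)
--         total += len(seen)
--     return total
--
-- def sampled_low_score_table_from_decoded(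
--     decoded_groups: Sequence[Sequence[Tuple[int, int]]],
-- ) -> List[Tuple[int, int]]:
--     scores = []
--     for low_guess in range(256):
--         score = sampled_output_stage_score_from_decoded(decoded_groups, low_guess)
--         scores.append((score, low_guess))
--     return scores
--
-- def best_sampled_low_plateau_from_decoded(
--     decoded_groups: Sequence[Sequence[Tuple[int, int]]],
--     max_width: int | None = None,
-- ) -> Tuple[int, List[int]]:
--     best_score = None
--     lows = []
--     for score, low_guess in sampled_low_score_table_from_decoded(decoded_groups):
--         if best_score is None or score < best_score:
--             best_score = score
--             lows = [low_guess]
--         elif score == best_score: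
--             lows.append(low_guess)
--     if max_width is not None:
--         lows = lows[:max_width]
--     return best_score if best_score is not None else 0, lows
-- ===== SOURCE B (Python) =====
-- def _group_scores(group):
--     # Distinct borrowed-high count of this group for every guess 0..255, maintained
--     # incrementally: element (h, l) contributes h & 0xFF while guess <= l and
--     # (h - 1) & 0xFF afterwards, so it flips exactly once, at guess l + 1.
--     cnt = {}
--     buckets = {}
--     for h, l in group:
--         h8 = h & 0xFF
--         v = (h8 - 1) & 0xFF if l < 0 else h8
--         if 0 <= l <= 254:
--             buckets.setdefault(l, []).append(h8)
--         cnt[v] = cnt.get(v, 0) + 1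
--     d = len(cnt)
--     scores = [d]
--     for g in range(1, 256):
--         for h8 in buckets.get(g - 1, ()):
--             v_new = (h8 - 1) & 0xFF
--             c = cnt.get(h8, 0) - 1
--             cnt[h8] = c
--             if c == 0:
--                 d -= 1
--             if cnt.get(v_new, 0) == 0:
--                 d += 1
--             cnt[v_new] = cnt.get(v_new, 0) + 1
--         scores.append(d)
--     return scores
--
--
-- def best_sampled_low_plateau_from_decoded(decoded_groups, max_width=None):
--     total = [0] * 256
--     for group in decoded_groups:
--         gs = _group_scores(group)
--         total = [t + s for t, s in zip(total, gs)]
--     best = min(total)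
--     lows = [g for g in range(256) if total[g] == best]
--     if max_width is not None:
--         lows = lows[:max_width]
--     return best, lows
-- ===== Notes on version B (the rewrite author's own statement) =====
-- stated objective: faster
-- what changed: Instead of rebuilding a fresh set per group for each of the 256 guesses, B buckets each group's elements by the guess at which their borrow flips and sweeps the guess 0..255 once, updating a value counter and the distinct count incrementally per flip.
import Mathlib
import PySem

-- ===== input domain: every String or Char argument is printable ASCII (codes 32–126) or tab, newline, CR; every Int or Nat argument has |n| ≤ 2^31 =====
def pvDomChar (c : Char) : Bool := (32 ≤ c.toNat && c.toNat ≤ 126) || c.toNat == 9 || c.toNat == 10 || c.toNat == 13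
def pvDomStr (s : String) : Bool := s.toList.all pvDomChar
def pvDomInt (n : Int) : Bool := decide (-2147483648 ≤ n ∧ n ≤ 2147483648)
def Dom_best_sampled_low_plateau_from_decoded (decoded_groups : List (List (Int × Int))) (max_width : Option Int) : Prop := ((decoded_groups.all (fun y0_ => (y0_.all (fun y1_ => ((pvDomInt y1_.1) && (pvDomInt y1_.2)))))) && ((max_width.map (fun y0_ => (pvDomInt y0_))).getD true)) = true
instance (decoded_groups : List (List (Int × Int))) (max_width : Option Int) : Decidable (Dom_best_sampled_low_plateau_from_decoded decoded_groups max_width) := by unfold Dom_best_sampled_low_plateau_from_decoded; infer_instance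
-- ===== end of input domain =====

set_option maxRecDepth 16384


-- B replaces A's 256 full per-guess set rebuilds by one bucketing pass per group plus an
-- incremental distinct-count sweep over the 256 guesses (objective: faster).

-- ===== PORT A =====
-- sampled_output_stage_score_from_decoded
def pvAScore (decoded_groups : List (List (Int × Int))) (state_low_guess : Int) : Int :=
  decoded_groups.foldl (fun total group =>
    total + PySem.Set.len (group.foldl (fun seen p =>
      PySem.Set.add seen (PySem.Int.band (p.1 - (if p.2 < state_low_guess then 1 else 0)) 255))
      PySem.Set.empty)) 0

-- sampled_low_score_table_from_decoded
def pvATable (decoded_groups : List (List (Int × Int))) : List (Int × Int) :=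
  (PySem.List.pyRange 0 256 1).foldl
    (fun scores low_guess => scores ++ [(pvAScore decoded_groups low_guess, low_guess)]) []

-- one step of A's min-plateau scan loop
def pvAStep (st : Option Int × List Int) (p : Int × Int) : Option Int × List Int :=
  match st.1 with
  | none => (some p.1, [p.2])
  | some b => if p.1 < b then (some p.1, [p.2])
              else if p.1 = b then (st.1, st.2 ++ [p.2])
              else st

def best_sampled_low_plateau_from_decoded (decoded_groups : List (List (Int × Int))) (max_width : Option Int) : Int × List Int :=
  let res := (pvATable decoded_groups).foldl pvAStep ((none : Option Int), ([] : List Int))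
  let lows := match max_width with
    | some w => PySem.List.slice res.2 none (some w)
    | none => res.2
  ((res.1).getD 0, lows)

-- ===== PORT B =====
-- loop body of _group_scores' first loop, cnt component: cnt[v] = cnt.get(v, 0) + 1
def pvCntStep (cnt : PySem.Dict Int Int) (p : Int × Int) : PySem.Dict Int Int :=
  let h8 := PySem.Int.band p.1 255
  let v := if p.2 < 0 then PySem.Int.band (h8 - 1) 255 else h8
  cnt.insert v (cnt.getD v 0 + 1)

-- loop body of _group_scores' first loop, buckets component: buckets.setdefault(l, []).append(h8)
def pvBucketStep (b : PySem.Dict Int (List Int)) (p : Int × Int) : PySem.Dict Int (List Int) :=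
  if 0 ≤ p.2 ∧ p.2 ≤ 254 then b.modify p.2 [] (· ++ [PySem.Int.band p.1 255]) else b

-- the per-flip update of (cnt, d) in _group_scores' inner loop
def pvFlip (st : PySem.Dict Int Int × Int) (h8 : Int) : PySem.Dict Int Int × Int :=
  let v_new := PySem.Int.band (h8 - 1) 255
  let c := st.1.getD h8 0 - 1
  let cnt := st.1.insert h8 c
  let d := if c = 0 then st.2 - 1 else st.2
  let d := if cnt.getD v_new 0 = 0 then d + 1 else d
  (cnt.insert v_new (cnt.getD v_new 0 + 1), d)

-- _group_scores
def pvGroupScores (group : List (Int × Int)) : List Int :=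
  let ib := group.foldl (fun st p => (pvCntStep st.1 p, pvBucketStep st.2 p))
    ((PySem.Dict.empty : PySem.Dict Int Int), (PySem.Dict.empty : PySem.Dict Int (List Int)))
  let d0 : Int := (ib.1.size : Int)
  let fin := (PySem.List.pyRange 1 256 1).foldl
    (fun st g =>
      let cd := (ib.2.getD (g - 1) []).foldl pvFlip st.1
      (cd, st.2 ++ [cd.2]))
    ((ib.1, d0), [d0])
  fin.2

def best_sampled_low_plateau_from_decoded_alt (decoded_groups : List (List (Int × Int))) (max_width : Option Int) : Int × List Int :=
  let total := decoded_groups.foldl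
    (fun tot group => (tot.zip (pvGroupScores group)).map (fun q => q.1 + q.2))
    (List.replicate 256 (0 : Int))
  -- min(total): total always has length 256, so the .getD default is never used
  let best := (PySem.List.min? total (fun x => x)).getD 0
  let lows := (PySem.List.pyRange 0 256 1).filter (fun g => PySem.List.pyGetD total g 0 == best)
  let lows := match max_width with
    | some w => PySem.List.slice lows none (some w)
    | none => lows
  (best, lows)

-- ===== PRECONDITION & SPEC =====
def Spec_best_sampled_low_plateau_from_decoded (decoded_groups : List (List (Int × Int))) (max_width : Option Int) (out : Int × List Int) : Prop := out = best_sampled_low_plateau_from_decoded_alt decoded_groups max_width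
instance (decoded_groups : List (List (Int × Int))) (max_width : Option Int) (out : Int × List Int) : Decidable (Spec_best_sampled_low_plateau_from_decoded decoded_groups max_width out) := by unfold Spec_best_sampled_low_plateau_from_decoded; infer_instance

-- ===== CLAIM (what is proved, stated in full; the proofs are below) =====
def Claim_equal_best_sampled_low_plateau_from_decoded : Prop := ∀ (decoded_groups : List (List (Int × Int))) (max_width : Option Int), Dom_best_sampled_low_plateau_from_decoded decoded_groups max_width → Spec_best_sampled_low_plateau_from_decoded decoded_groups max_width (best_sampled_low_plateau_from_decoded decoded_groups max_width)

-- ===== LEMMAS AND PROOFS =====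

-- x & 0xFF is x mod 256
theorem pv_band255 (x : Int) : PySem.Int.band x 255 = x.emod 256 := by
  have h255 : (255 : Nat) = 2^8 - 1 := by norm_num
  unfold PySem.Int.band
  by_cases hx : 0 ≤ x
  · simp only [hx, if_true, show (0:Int) ≤ 255 by norm_num, if_true]
    have h : x.toNat &&& (255:Int).toNat = x.toNat % 256 := by
      rw [show (255:Int).toNat = 255 from rfl, h255, Nat.and_two_pow_sub_one_eq_mod]
    rw [h]
    push_cast [Int.toNat_of_nonneg hx]
    rfl
  · simp only [hx, if_false, show (0:Int) ≤ 255 by norm_num, if_true]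
    have h : (255:Int).toNat &&& (-x-1).toNat = (-x-1).toNat % 256 := by
      rw [Nat.and_comm, show (255:Int).toNat = 255 from rfl, h255, Nat.and_two_pow_sub_one_eq_mod]
    rw [h]
    have h2 : ((-x-1).toNat : Int) = -x-1 := Int.toNat_of_nonneg (by omega)
    have h3 : ((-x-1).toNat % 256 : Nat) = ((-x-1) % 256).toNat := by omega
    rw [h3]
    have h4 : (0:Int) ≤ (-x-1) % 256 := Int.emod_nonneg _ (by norm_num)
    have h5 : (-x-1) % 256 < 256 := Int.emod_lt_of_pos _ (by norm_num)
    have h6 : x.emod 256 = x % 256 := rfl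
    rw [h6]
    omega

theorem pv_band255_sub_one (x : Int) :
    PySem.Int.band (x - 1) 255 = PySem.Int.band (PySem.Int.band x 255 - 1) 255 := by
  simp only [pv_band255]
  show (x - 1) % 256 = (x % 256 - 1) % 256
  conv_lhs => rw [Int.sub_emod]
  conv_rhs => rw [Int.sub_emod, Int.emod_emod_of_dvd x dvd_rfl]

-- the value an element contributes at a given guess
def pvVal (g : Int) (p : Int × Int) : Int :=
  PySem.Int.band (p.1 - (if p.2 < g then 1 else 0)) 255

-- the distinct borrowed-high count of a group at a given guess
def pvD (group : List (Int × Int)) (g : Int) : Int :=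
  (((group.map (pvVal g)).toFinset.card : Nat) : Int)

-- the per-guess total over all groups
def pvS (decoded_groups : List (List (Int × Int))) (g : Int) : Int :=
  decoded_groups.foldl (fun t grp => t + pvD grp g) 0

theorem pv_dedup_length (L : List Int) : ((PySem.List.dedup L).length : Int) = ((L.toFinset.card : Nat) : Int) := by
  have h1 : (PySem.List.dedup L).toFinset = L.toFinset := by
    apply Finset.ext
    intro a
    simp
  have h2 : (PySem.List.dedup L).toFinset.card = (PySem.List.dedup L).length :=
    List.toFinset_card_of_nodup (PySem.List.nodup_dedup L)
  rw [← h1, h2]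

theorem pv_ascore_eq (dg : List (List (Int × Int))) (g : Int) : pvAScore dg g = pvS dg g := by
  unfold pvAScore pvS
  congr 1
  funext t grp
  congr 1
  have hfold : grp.foldl (fun seen p =>
      PySem.Set.add seen (PySem.Int.band (p.1 - (if p.2 < g then 1 else 0)) 255)) PySem.Set.empty
      = PySem.Set.ofList (grp.map (pvVal g)) := by
    rw [PySem.Set.ofList_eq_foldl, List.foldl_map]
    rfl
  rw [hfold, ← PySem.List.dedup_eq_ofList]
  show ((PySem.List.dedup (grp.map (pvVal g))).length : Int) = pvD grp g
  rw [pv_dedup_length]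
  rfl

-- ===== B side: the incremental sweep =====

def pvRep (cnt : PySem.Dict Int Int) (d : Int) (M : Multiset Int) : Prop :=
  (∀ v : Int, cnt.getD v 0 = (M.count v : Int)) ∧ d = ((M.toFinset.card : Nat) : Int)

theorem pv_flip_one (cnt : PySem.Dict Int Int) (d : Int) (h8 : Int) (M' : Multiset Int)
    (hh : 0 ≤ h8 ∧ h8 < 256) (hr : pvRep cnt d (h8 ::ₘ M')) :
    pvRep (pvFlip (cnt, d) h8).1 (pvFlip (cnt, d) h8).2 (PySem.Int.band (h8 - 1) 255 ::ₘ M') := by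
  obtain ⟨HC, HD⟩ := hr
  set v_new := PySem.Int.band (h8 - 1) 255 with hv
  have hvr : v_new = (h8 - 1).emod 256 := pv_band255 _
  have hne : v_new ≠ h8 := by rw [hvr]; show (h8 - 1) % 256 ≠ h8; omega
  have hc : cnt.getD h8 0 = (M'.count h8 : Int) + 1 := by
    rw [HC h8, Multiset.count_cons_self]; push_cast; ring
  have hcv : cnt.getD v_new 0 = (M'.count v_new : Int) := by
    rw [HC v_new, Multiset.count_cons_of_ne hne]
  unfold pvFlip
  simp only
  constructor
  · intro v
    rw [PySem.Dict.getD_insert, PySem.Dict.getD_insert, PySem.Dict.getD_insert]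
    by_cases h1 : v = v_new
    · rw [if_pos h1, if_neg hne, hcv, h1, Multiset.count_cons_self]
      push_cast; ring
    · rw [if_neg h1]
      by_cases h2 : v = h8
      · subst h2
        rw [if_pos rfl, Multiset.count_cons_of_ne h1, hc]
        ring
      · rw [if_neg h2, HC v, Multiset.count_cons_of_ne h2, Multiset.count_cons_of_ne h1]
  · rw [PySem.Dict.getD_insert, if_neg hne, hcv]
    have hM : (h8 ::ₘ M').toFinset = insert h8 M'.toFinset := Multiset.toFinset_cons _ _
    have hMn : (v_new ::ₘ M').toFinset = insert v_new M'.toFinset := Multiset.toFinset_cons _ _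
    rw [hMn]
    rw [hM] at HD
    by_cases hmem : h8 ∈ M'.toFinset
    · rw [Finset.insert_eq_self.mpr hmem] at HD
      have hcne : cnt.getD h8 0 - 1 ≠ 0 := by
        rw [hc]
        have hp := Multiset.count_pos.mpr (Multiset.mem_toFinset.mp hmem)
        omega
      rw [if_neg hcne]
      by_cases hmv : v_new ∈ M'.toFinset
      · rw [Finset.insert_eq_self.mpr hmv]
        have : (M'.count v_new : Int) ≠ 0 := by
          have := Multiset.count_pos.mpr (Multiset.mem_toFinset.mp hmv); omega
        rw [if_neg this, HD]
      · rw [Finset.card_insert_of_notMem hmv]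
        have : (M'.count v_new : Int) = 0 := by
          have := Multiset.count_eq_zero.mpr (fun hx => hmv (Multiset.mem_toFinset.mpr hx)); omega
        rw [if_pos this, HD]; push_cast; ring
    · rw [Finset.card_insert_of_notMem hmem] at HD
      have hcz : cnt.getD h8 0 - 1 = 0 := by
        have : M'.count h8 = 0 := Multiset.count_eq_zero.mpr (fun hx => hmem (Multiset.mem_toFinset.mpr hx))
        rw [hc, this]; omega
      rw [if_pos hcz]
      by_cases hmv : v_new ∈ M'.toFinset
      · rw [Finset.insert_eq_self.mpr hmv]
        have : (M'.count v_new : Int) ≠ 0 := by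
          have := Multiset.count_pos.mpr (Multiset.mem_toFinset.mp hmv); omega
        rw [if_neg this, HD]; push_cast; ring
      · rw [Finset.card_insert_of_notMem hmv]
        have : (M'.count v_new : Int) = 0 := by
          have := Multiset.count_eq_zero.mpr (fun hx => hmv (Multiset.mem_toFinset.mpr hx)); omega
        rw [if_pos this, HD]; push_cast; ring

theorem pv_flip_fold (bs : List Int) : ∀ (M' : Multiset Int) (cnt : PySem.Dict Int Int) (d : Int),
    (∀ h8 ∈ bs, 0 ≤ h8 ∧ h8 < 256) → pvRep cnt d (↑bs + M') →
    pvRep (bs.foldl pvFlip (cnt, d)).1 (bs.foldl pvFlip (cnt, d)).2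
      (↑(bs.map (fun h8 => PySem.Int.band (h8 - 1) 255)) + M') := by
  induction bs with
  | nil => intro M' cnt d _ hr; simpa using hr
  | cons h t ih =>
    intro M' cnt d hb hr
    simp only [List.foldl_cons, List.map_cons]
    have h1 : (↑(h :: t) : Multiset Int) + M' = h ::ₘ (↑t + M') := by
      rw [← Multiset.cons_coe, Multiset.cons_add]
    rw [h1] at hr
    have hstep := pv_flip_one cnt d h (↑t + M') (hb h (by simp)) hr
    have h2 : PySem.Int.band (h - 1) 255 ::ₘ (↑t + M')
        = ↑t + (PySem.Int.band (h - 1) 255 ::ₘ M') := by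
      simp [Multiset.add_cons]
    rw [h2] at hstep
    have := ih (PySem.Int.band (h - 1) 255 ::ₘ M') (pvFlip (cnt, d) h).1 (pvFlip (cnt, d) h).2
      (fun x hx => hb x (by simp [hx])) hstep
    have h3 : (↑(t.map (fun h8 => PySem.Int.band (h8 - 1) 255)) : Multiset Int)
        + (PySem.Int.band (h - 1) 255 ::ₘ M')
        = ↑(PySem.Int.band (h - 1) 255 :: t.map (fun h8 => PySem.Int.band (h8 - 1) 255)) + M' := by
      simp [← Multiset.cons_coe, Multiset.add_cons, Multiset.cons_add]
    rw [h3] at this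
    simpa using this

-- the bucket dictionary built by the first loop
theorem pv_bucket_getD (grp : List (Int × Int)) (t : Int) (ht : 0 ≤ t ∧ t ≤ 254) :
    (grp.foldl pvBucketStep PySem.Dict.empty).getD t []
      = (grp.filter (fun p => decide (p.2 = t))).map (fun p => PySem.Int.band p.1 255) := by
  have hf : pvBucketStep = fun (b : PySem.Dict Int (List Int)) p =>
      if (fun (q : Int × Int) => decide (0 ≤ q.2 ∧ q.2 ≤ 254)) p = true
      then b.modify p.2 [] (· ++ [PySem.Int.band p.1 255]) else b := by
    funext b p
    simp [pvBucketStep]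
  rw [hf, ← List.foldl_filter]
  have h2 : (grp.filter (fun p => decide (0 ≤ p.2 ∧ p.2 ≤ 254))).foldl
        (fun b p => b.modify p.2 [] (· ++ [PySem.Int.band p.1 255])) PySem.Dict.empty
      = ((grp.filter (fun p => decide (0 ≤ p.2 ∧ p.2 ≤ 254))).map
          (fun p => (p.2, PySem.Int.band p.1 255))).foldl
          (fun d q => d.modify q.1 [] (· ++ [q.2])) PySem.Dict.empty := by
    rw [List.foldl_map]
  rw [h2, PySem.Dict.getD_foldl_modify_append, List.filter_map, List.map_map, List.filter_filter]
  have h3 : ∀ p ∈ grp, ((((fun (q : Int × Int) => q.1 == t) ∘ fun (p : Int × Int) => (p.2, PySem.Int.band p.1 255)) p)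
      && decide (0 ≤ p.2 ∧ p.2 ≤ 254)) = decide (p.2 = t) := by
    intro p _
    by_cases hp : p.2 = t
    · simp [hp]; omega
    · simp [hp]
  rw [List.filter_congr h3]
  simp [Function.comp]

theorem pv_multiset_step (grp : List (Int × Int)) (g : Int) :
    ((↑(grp.map (pvVal (g - 1))) : Multiset Int)
       = ↑((grp.filter (fun p => decide (p.2 = g - 1))).map (fun p => PySem.Int.band p.1 255))
         + ↑((grp.filter (fun p => !decide (p.2 = g - 1))).map (pvVal (g - 1))))
    ∧ ((↑(grp.map (pvVal g)) : Multiset Int)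
       = ↑(((grp.filter (fun p => decide (p.2 = g - 1))).map (fun p => PySem.Int.band p.1 255)).map
             (fun h8 => PySem.Int.band (h8 - 1) 255))
         + ↑((grp.filter (fun p => !decide (p.2 = g - 1))).map (pvVal (g - 1)))) := by
  have hperm := List.filter_append_perm (fun p => decide (p.2 = g - 1)) grp
  constructor
  · have h1 : (grp.filter (fun p => decide (p.2 = g - 1))).map (pvVal (g - 1))
        = (grp.filter (fun p => decide (p.2 = g - 1))).map (fun p => PySem.Int.band p.1 255) := by
      apply List.map_congr_left
      intro p hp
      have hc : p.2 = g - 1 := by simpa using (List.mem_filter.mp hp).2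
      unfold pvVal
      rw [if_neg (by omega)]
      norm_num
    calc (↑(grp.map (pvVal (g - 1))) : Multiset Int)
        = ↑(((grp.filter (fun p => decide (p.2 = g - 1))
              ++ grp.filter (fun p => !decide (p.2 = g - 1))).map (pvVal (g - 1)))) := by
          exact (Multiset.coe_eq_coe.mpr (hperm.map (pvVal (g - 1)))).symm
      _ = _ := by rw [List.map_append, ← Multiset.coe_add, h1]
  · have h1 : (grp.filter (fun p => decide (p.2 = g - 1))).map (pvVal g)
        = ((grp.filter (fun p => decide (p.2 = g - 1))).map (fun p => PySem.Int.band p.1 255)).map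
            (fun h8 => PySem.Int.band (h8 - 1) 255) := by
      rw [List.map_map]
      apply List.map_congr_left
      intro p hp
      have hc : p.2 = g - 1 := by simpa using (List.mem_filter.mp hp).2
      unfold pvVal
      rw [if_pos (by omega)]
      exact pv_band255_sub_one p.1
    have h2 : (grp.filter (fun p => !decide (p.2 = g - 1))).map (pvVal g)
        = (grp.filter (fun p => !decide (p.2 = g - 1))).map (pvVal (g - 1)) := by
      apply List.map_congr_left
      intro p hp
      have hc : p.2 ≠ g - 1 := by simpa using (List.mem_filter.mp hp).2
      unfold pvVal
      by_cases hlt : p.2 < g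
      · rw [if_pos hlt, if_pos (by omega)]
      · rw [if_neg hlt, if_neg (by omega)]
    calc (↑(grp.map (pvVal g)) : Multiset Int)
        = ↑(((grp.filter (fun p => decide (p.2 = g - 1))
              ++ grp.filter (fun p => !decide (p.2 = g - 1))).map (pvVal g))) := by
          exact (Multiset.coe_eq_coe.mpr (hperm.map (pvVal g))).symm
      _ = _ := by rw [List.map_append, ← Multiset.coe_add, h1, h2]

theorem pv_rep_init (grp : List (Int × Int)) :
    pvRep (grp.foldl pvCntStep PySem.Dict.empty) (((grp.foldl pvCntStep PySem.Dict.empty).size : Nat) : Int)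
      (↑(grp.map (pvVal 0))) := by
  have hf : pvCntStep = fun (cnt : PySem.Dict Int Int) p =>
      cnt.insert (pvVal 0 p) (cnt.getD (pvVal 0 p) 0 + 1) := by
    funext cnt p
    unfold pvCntStep pvVal
    by_cases hp : p.2 < 0
    · simp only [hp, if_true, ← pv_band255_sub_one]
    · simp only [hp, if_false]
      norm_num
  have hmap : grp.foldl (fun (cnt : PySem.Dict Int Int) p =>
        cnt.insert (pvVal 0 p) (cnt.getD (pvVal 0 p) 0 + 1)) PySem.Dict.empty
      = (grp.map (pvVal 0)).foldl (fun d x => d.insert x (d.getD x 0 + 1)) PySem.Dict.empty := by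
    rw [List.foldl_map]
  rw [hf, hmap, PySem.Dict.foldl_insert_getD_add_one_eq_counter]
  constructor
  · intro v
    rw [PySem.Dict.getD_counter, Multiset.coe_count]
  · have hk : (PySem.Dict.counter (grp.map (pvVal 0))).size
        = (PySem.Dict.counter (grp.map (pvVal 0))).keys.length := by
      simp [PySem.Dict.size, PySem.Dict.keys]
    rw [hk, PySem.Dict.keys_counter, ← PySem.List.dedup_eq_ofList]
    rw [pv_dedup_length]
    rfl

theorem pv_sweep (grp : List (Int × Int)) (n : Nat) (hn : n ≤ 255) :
    ∀ (cnt : PySem.Dict Int Int) (d : Int) (scores : List Int),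
    pvRep cnt d (↑(grp.map (pvVal (255 - (n : Int))))) →
    ((PySem.List.pyRange (256 - (n : Int)) 256 1).foldl
      (fun st g =>
        let cd := ((grp.foldl pvBucketStep PySem.Dict.empty).getD (g - 1) []).foldl pvFlip st.1
        (cd, st.2 ++ [cd.2]))
      ((cnt, d), scores)).2
    = scores ++ (PySem.List.pyRange (256 - (n : Int)) 256 1).map (pvD grp) := by
  induction n with
  | zero =>
    intro cnt d scores _
    rw [PySem.List.pyRange_one_eq_nil (by norm_num)]
    simp
  | succ n ih =>
    intro cnt d scores hr
    have hg1 : (1 : Int) ≤ 256 - ((n+1 : Nat) : Int) := by push_cast; omega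
    have hg2 : (256 : Int) - ((n+1 : Nat) : Int) ≤ 255 := by push_cast; omega
    rw [PySem.List.pyRange_one_cons (by omega)]
    simp only [List.foldl_cons, List.map_cons]
    set g : Int := 256 - ((n+1 : Nat) : Int) with hgdef
    have hbkt := pv_bucket_getD grp (g - 1) (by omega)
    have hidx : (255 : Int) - ((n+1 : Nat) : Int) = g - 1 := by omega
    rw [hidx] at hr
    obtain ⟨ms1, ms2⟩ := pv_multiset_step grp g
    rw [ms1] at hr
    have hbound : ∀ h8 ∈ (grp.filter (fun p => decide (p.2 = g - 1))).map
        (fun p => PySem.Int.band p.1 255), 0 ≤ h8 ∧ h8 < 256 := by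
      intro h8 hh
      obtain ⟨p, _, hp⟩ := List.mem_map.mp hh
      rw [← hp, pv_band255]
      constructor
      · exact Int.emod_nonneg _ (by norm_num)
      · exact Int.emod_lt_of_pos _ (by norm_num)
    have hrep2 := pv_flip_fold _ _ _ _ hbound hr
    rw [← ms2] at hrep2
    set cd := (((grp.filter (fun p => decide (p.2 = g - 1))).map
        (fun p => PySem.Int.band p.1 255)).foldl pvFlip (cnt, d)) with hcddef
    have hd : cd.2 = pvD grp g := by
      have := hrep2.2
      unfold pvD
      rw [this, List.toFinset_coe]
    have hnext : (255 : Int) - ((n : Nat) : Int) = g := by omega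
    have hstep : (256 : Int) - ((n : Nat) : Int) = g + 1 := by omega
    have ihh := ih (by omega) cd.1 cd.2 (scores ++ [cd.2]) (by rw [hnext]; exact hrep2)
    rw [hstep] at ihh
    rw [hbkt]
    show ((PySem.List.pyRange (g + 1) 256 1).foldl _ ((cd.1, cd.2), scores ++ [cd.2])).2 = _
    rw [ihh, hd]
    simp

theorem pv_group_scores (grp : List (Int × Int)) :
    pvGroupScores grp = (PySem.List.pyRange 0 256 1).map (pvD grp) := by
  unfold pvGroupScores
  rw [PySem.List.foldl_prod_mk]
  simp only
  have hinit := pv_rep_init grp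
  have hd0 : ((grp.foldl pvCntStep PySem.Dict.empty).size : Int) = pvD grp 0 := by
    rw [hinit.2]
    unfold pvD
    rw [List.toFinset_coe]
  have h255 : ((255 : Nat) : Int) = 255 := by norm_num
  have hsw := pv_sweep grp 255 (le_refl _) (grp.foldl pvCntStep PySem.Dict.empty)
    ((grp.foldl pvCntStep PySem.Dict.empty).size : Int)
    [((grp.foldl pvCntStep PySem.Dict.empty).size : Int)]
    (by rw [h255]; simpa using hinit)
  rw [h255] at hsw
  norm_num at hsw ⊢
  rw [hsw, hd0]
  rw [PySem.List.pyRange_one_cons (show (0:Int) < 256 by norm_num)]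
  simp

theorem pv_total_aux (dg : List (List (Int × Int))) : ∀ f : Int → Int,
    dg.foldl (fun tot grp => (tot.zip (pvGroupScores grp)).map (fun q => q.1 + q.2))
      ((PySem.List.pyRange 0 256 1).map f)
    = (PySem.List.pyRange 0 256 1).map (fun g => dg.foldl (fun t grp => t + pvD grp g) (f g)) := by
  induction dg with
  | nil => intro f; rfl
  | cons grp rest ih =>
    intro f
    simp only [List.foldl_cons]
    have hz : (((PySem.List.pyRange 0 256 1).map f).zip (pvGroupScores grp)).map (fun q => q.1 + q.2)
        = (PySem.List.pyRange 0 256 1).map (fun g => f g + pvD grp g) := by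
      rw [pv_group_scores, List.zip_map', List.map_map]
      rfl
    rw [hz, ih]

theorem pv_total (dg : List (List (Int × Int))) :
    dg.foldl (fun tot grp => (tot.zip (pvGroupScores grp)).map (fun q => q.1 + q.2))
      (List.replicate 256 (0 : Int))
    = (PySem.List.pyRange 0 256 1).map (pvS dg) := by
  have hrep : List.replicate 256 (0 : Int) = (PySem.List.pyRange 0 256 1).map (fun _ => (0 : Int)) := by
    rw [List.map_const']
    congr 1
  rw [hrep, pv_total_aux dg (fun _ => 0)]
  rfl

-- ===== the final min-plateau scan =====

theorem pv_minf_le (l : List (Int × Int)) : ∀ m : Int, l.foldl (fun b p => min b p.1) m ≤ m := by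
  induction l with
  | nil => intro m; simp
  | cons x t ih =>
    intro m
    simp only [List.foldl_cons]
    exact le_trans (ih (min m x.1)) (min_le_left _ _)

theorem pv_scan_go (l : List (Int × Int)) : ∀ (m : Int) (lows : List Int),
    l.foldl pvAStep (some m, lows)
      = (some (l.foldl (fun b p => min b p.1) m),
         (if l.foldl (fun b p => min b p.1) m = m then lows else [])
           ++ (l.filter (fun p => decide (p.1 = l.foldl (fun b p => min b p.1) m))).map (·.2)) := by
  induction l with
  | nil => intro m lows; simp
  | cons x t ih =>
    intro m lows
    simp only [List.foldl_cons]
    rcases lt_trichotomy x.1 m with h | h | h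
    · have hstep : pvAStep (some m, lows) x = (some x.1, [x.2]) := by
        simp [pvAStep, h]
      rw [hstep, ih]
      have hmin : min m x.1 = x.1 := min_eq_right (le_of_lt h)
      simp only [hmin]
      set M := t.foldl (fun b p => min b p.1) x.1 with hMdef
      have hle : M ≤ x.1 := pv_minf_le t x.1
      have hM : M ≠ m := by omega
      rw [if_neg hM]
      simp only [List.filter_cons]
      by_cases hx : x.1 = M
      · rw [if_pos hx.symm, if_pos (by simpa using hx)]
        simp
      · rw [if_neg (fun hh => hx hh.symm), if_neg (by simpa using hx)]
    · have hstep : pvAStep (some m, lows) x = (some m, lows ++ [x.2]) := by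
        simp [pvAStep, h]
      rw [hstep, ih]
      have hmin : min m x.1 = m := by omega
      simp only [hmin]
      set M := t.foldl (fun b p => min b p.1) m with hMdef
      have hle : M ≤ m := pv_minf_le t m
      simp only [List.filter_cons]
      by_cases hM : M = m
      · rw [if_pos hM, if_pos hM, if_pos (by simp; omega)]
        simp
      · rw [if_neg hM, if_neg hM, if_neg (by simp; omega)]
    · have hstep : pvAStep (some m, lows) x = (some m, lows) := by
        simp [pvAStep, show ¬ x.1 < m by omega, show x.1 ≠ m by omega]
      rw [hstep, ih]
      have hmin : min m x.1 = m := by omega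
      simp only [hmin]
      set M := t.foldl (fun b p => min b p.1) m with hMdef
      have hle : M ≤ m := pv_minf_le t m
      simp only [List.filter_cons]
      rw [if_neg (show ¬ (decide (x.1 = M) = true) by simp; omega)]

theorem pv_min?_go : ∀ (xs : List Int) (m : Int), PySem.List.min? (m :: xs) (fun x => x) = some (xs.foldl min m) := by
  intro xs
  unfold PySem.List.min?
  simp only [List.foldl_cons]
  induction xs with
  | nil => intro m; rfl
  | cons x t ih =>
    intro m
    simp only [List.foldl_cons]
    show List.foldl _ (if x < m then some x else some m) t = some (List.foldl min (min m x) t)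
    by_cases h : x < m
    · rw [if_pos h, show (min m x) = x by omega]
      exact ih x
    · rw [if_neg h, show (min m x) = m by omega]
      exact ih m

-- ===== VERDICT (by name: the statement is the Claim_ definition above) =====
theorem pv_table_eq (dg : List (List (Int × Int))) :
    pvATable dg = (PySem.List.pyRange 0 256 1).map (fun g => (pvS dg g, g)) := by
  unfold pvATable
  rw [PySem.List.foldl_append_singleton_eq_map]
  simp only [List.nil_append]
  exact List.map_congr_left (fun g _ => by rw [pv_ascore_eq])

theorem best_sampled_low_plateau_from_decoded_spec : Claim_equal_best_sampled_low_plateau_from_decoded := by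
  intro dg mw _
  unfold Spec_best_sampled_low_plateau_from_decoded
  unfold best_sampled_low_plateau_from_decoded best_sampled_low_plateau_from_decoded_alt
  simp only [pv_table_eq, pv_total]
  have hR : PySem.List.pyRange 0 256 1 = 0 :: PySem.List.pyRange 1 256 1 :=
    PySem.List.pyRange_one_cons (by norm_num)
  set S := pvS dg with hS
  set R1 := PySem.List.pyRange 1 256 1 with hR1
  set M : Int := R1.foldl (fun b g => min b (S g)) (S 0) with hM
  -- A's scan
  have hscanA : ((PySem.List.pyRange 0 256 1).map (fun g => (S g, g))).foldl pvAStep (none, [])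
      = (some M, (if M = S 0 then [0] else []) ++ R1.filter (fun g => decide (S g = M))) := by
    rw [hR]
    simp only [List.map_cons, List.foldl_cons]
    have h1 : pvAStep (none, []) (S 0, 0) = (some (S 0), [0]) := rfl
    rw [h1, pv_scan_go]
    have hmin : (R1.map (fun g => (S g, g))).foldl (fun b p => min b p.1) (S 0) = M := by
      rw [List.foldl_map]
    rw [hmin]
    refine congrArg₂ Prod.mk rfl (congrArg₂ (· ++ ·) rfl ?_)
    rw [List.filter_map, List.map_map]
    show List.map (fun g => g) (List.filter (fun g => decide (S g = M)) R1) = _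
    simp
  -- B's min
  have hminB : PySem.List.min? ((PySem.List.pyRange 0 256 1).map S) (fun x => x) = some M := by
    rw [hR]
    simp only [List.map_cons]
    rw [pv_min?_go, List.foldl_map]
  -- B's lows
  have hlowsB : (PySem.List.pyRange 0 256 1).filter
        (fun g => PySem.List.pyGetD ((PySem.List.pyRange 0 256 1).map S) g 0 == M)
      = (PySem.List.pyRange 0 256 1).filter (fun g => decide (S g = M)) := by
    apply List.filter_congr
    intro g hg
    have hb := PySem.List.mem_pyRange_one.mp hg
    have hget : PySem.List.pyGetD ((PySem.List.pyRange 0 256 1).map S) g 0 = S g := by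
      have h256 : (256 : Int) = ((256 : Nat) : Int) := by norm_num
      have hgn : ((g.toNat : Nat) : Int) = g := Int.toNat_of_nonneg hb.1
      rw [h256, ← hgn, PySem.List.pyGetD_map_pyRange S 256 g.toNat 0 (by omega)]
    rw [hget]
    by_cases h : S g = M
    · simp [h]
    · simp [h]
  -- the two lows lists agree
  have hlows : (if M = S 0 then [(0:Int)] else []) ++ R1.filter (fun g => decide (S g = M))
      = (PySem.List.pyRange 0 256 1).filter (fun g => decide (S g = M)) := by
    rw [hR, List.filter_cons]
    by_cases h : S 0 = M
    · rw [if_pos h.symm, if_pos (by simp [h])]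
      rfl
    · rw [if_neg (fun hx => h hx.symm), if_neg (by simp [h])]
      rfl
  simp only [hscanA, hminB, hlowsB, ← hlows, Option.getD_some]
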